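-- pv_equiv track=rewrite | github.com/simpleauthority/csc369-ray-mastery | main.py | ss_build_buckets
-- ===== SOURCE A (Python) =====
-- def ss_build_buckets(data, splitters):
--     buckets = [[] for _ in range(len(splitters))]
--     for datum in data:
--         for i, splitter in enumerate(splitters):
--             if datum <= splitter:
--                 buckets[i].append(datum)
--                 break
--         else:
--             buckets[-1].append(datum)
--     return buckets
-- ===== SOURCE B (Python) =====
-- def ss_build_buckets(data, splitters):
--     buckets = [[] for _ in splitters]
--     remaining = list(data)
--     for i in range(len(splitters) - 1):
--         nxt = []
--         for x in remaining:
--             if x <= splitters[i]: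
--                 buckets[i].append(x)
--             else:
--                 nxt.append(x)
--         remaining = nxt
--     for x in remaining:
--         buckets[-1].append(x)
--     return buckets
-- ===== Notes on version B (the rewrite author's own statement) =====
-- stated objective: alternative
-- what changed: Replaced A's row-wise scan (each datum tested against every splitter until the first match) by column-wise repeated partitioning: each splitter but the last filters its bucket out of the surviving data in one pass, and the leftovers are appended one by one to the last bucket.
import Mathlib
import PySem

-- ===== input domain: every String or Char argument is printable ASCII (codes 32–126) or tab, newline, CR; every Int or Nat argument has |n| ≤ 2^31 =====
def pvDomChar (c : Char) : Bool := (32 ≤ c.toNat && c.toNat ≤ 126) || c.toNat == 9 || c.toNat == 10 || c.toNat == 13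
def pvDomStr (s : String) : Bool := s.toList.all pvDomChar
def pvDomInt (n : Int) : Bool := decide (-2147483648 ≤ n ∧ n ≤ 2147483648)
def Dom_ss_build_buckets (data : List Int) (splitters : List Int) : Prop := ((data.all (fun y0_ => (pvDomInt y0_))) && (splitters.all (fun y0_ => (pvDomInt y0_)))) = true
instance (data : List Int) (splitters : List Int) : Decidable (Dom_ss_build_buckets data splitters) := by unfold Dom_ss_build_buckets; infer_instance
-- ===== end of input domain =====

-- ===== PORT A =====
-- B assigns each datum per-splitter column-wise instead of per-datum row-wise; objective: alternative decomposition.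
-- inner for/else loop of A: walk splitters with index i; on the first splitter with datum ≤ splitter
-- append datum to buckets[i]; if none matches (for/else), append to buckets[-1].
def ssInnerA (d : Int) (bs : List (List Int)) (i : Nat) : List Int → List (List Int)
  | [] => bs.modify (bs.length - 1) (fun b => b ++ [d])
  | s :: rest => if d ≤ s then bs.modify i (fun b => b ++ [d]) else ssInnerA d bs (i + 1) rest

def ss_build_buckets (data : List Int) (splitters : List Int) : List (List Int) :=
  data.foldl (fun bs d => ssInnerA d bs 0 splitters) (List.replicate splitters.length [])

-- ===== PORT B =====
-- the i-loop of B: each splitter (except the last) partitions the remaining data into its bucket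
-- and the survivors; the last splitter's bucket catches everything left.
def ssPartsB (rem : List Int) : List Int → List (List Int)
  | [] => []
  | [_] => [rem]
  | s :: s2 :: rest =>
    let p := rem.partition (fun x => x ≤ s)
    p.1 :: ssPartsB p.2 (s2 :: rest)

def ss_build_buckets_alt (data : List Int) (splitters : List Int) : List (List Int) :=
  ssPartsB data splitters

-- ===== PRECONDITION & SPEC =====
-- Pre_ excludes only the inputs where Python A raises IndexError (buckets[-1] on no buckets):
-- empty splitters together with nonempty data. (Python B raises there too.)
def Pre_ss_build_buckets (data : List Int) (splitters : List Int) : Prop :=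
  splitters ≠ [] ∨ data = []
instance (data : List Int) (splitters : List Int) : Decidable (Pre_ss_build_buckets data splitters) := by
  unfold Pre_ss_build_buckets; infer_instance

def pvWitness_ss_build_buckets : List Int × List Int := ([5, -2, 9, 3, 3], [0, 4])

def Spec_ss_build_buckets (data : List Int) (splitters : List Int) (out : List (List Int)) : Prop := out = ss_build_buckets_alt data splitters
instance (data : List Int) (splitters : List Int) (out : List (List Int)) : Decidable (Spec_ss_build_buckets data splitters out) := by unfold Spec_ss_build_buckets; infer_instance

-- ===== CLAIM (what is proved, stated in full; the proofs are below) =====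
def Claim_equal_ss_build_buckets : Prop := ∀ (data : List Int) (splitters : List Int), Dom_ss_build_buckets data splitters → Pre_ss_build_buckets data splitters → Spec_ss_build_buckets data splitters (ss_build_buckets data splitters)

-- ===== LEMMAS AND PROOFS =====
theorem ssInnerA_cons (d : Int) (b : List Int) (bs : List (List Int)) (i : Nat)
    (ss : List Int) (h : bs ≠ []) :
    ssInnerA d (b :: bs) (i + 1) ss = b :: ssInnerA d bs i ss := by
  induction ss generalizing i with
  | nil =>
    simp only [ssInnerA]
    cases bs with
    | nil => exact absurd rfl h
    | cons c cs => simp [List.modify]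
  | cons s rest ih =>
    simp only [ssInnerA]
    split
    · simp [List.modify]
    · exact ih (i + 1)

theorem ssPartsB_ne_nil (rem : List Int) (ss : List Int) (h : ss ≠ []) :
    ssPartsB rem ss ≠ [] := by
  match ss with
  | [] => exact absurd rfl h
  | [s] => simp [ssPartsB]
  | s :: s2 :: rest => simp [ssPartsB]

theorem ssInnerA_parts (d : Int) (rem : List Int) (ss : List Int) (h : ss ≠ []) :
    ssInnerA d (ssPartsB rem ss) 0 ss = ssPartsB (rem ++ [d]) ss := by
  induction ss generalizing rem with
  | nil => exact absurd rfl h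
  | cons s rest ih =>
    cases rest with
    | nil =>
      simp only [ssPartsB, ssInnerA]
      split <;> simp [List.modify]
    | cons s2 rest2 =>
      have step : ∀ (bs : List (List Int)) (i : Nat),
          ssInnerA d bs i (s :: s2 :: rest2) =
            if d ≤ s then bs.modify i (fun b => b ++ [d])
            else ssInnerA d bs (i + 1) (s2 :: rest2) := by
        intro bs i; simp only [ssInnerA]
      by_cases hds : d ≤ s
      · simp only [ssPartsB, List.partition_eq_filter_filter, step, if_pos hds,
          List.filter_append]
        simp [List.modify, hds]
      · simp only [ssPartsB, List.partition_eq_filter_filter, step, if_neg hds,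
          List.filter_append]
        rw [ssInnerA_cons d _ _ 0 (s2 :: rest2) (ssPartsB_ne_nil _ _ (by simp)),
            ih _ (by simp)]
        simp [hds]

theorem ssPartsB_nil_eq (ss : List Int) :
    ssPartsB [] ss = List.replicate ss.length [] := by
  match ss with
  | [] => rfl
  | [s] => rfl
  | s :: s2 :: rest =>
    simp [ssPartsB, List.partition_eq_filter_filter, List.replicate_succ,
      ssPartsB_nil_eq (s2 :: rest)]

theorem foldl_ssInnerA (data : List Int) (ss : List Int) (h : ss ≠ []) (rem : List Int) :
    data.foldl (fun bs d => ssInnerA d bs 0 ss) (ssPartsB rem ss) = ssPartsB (rem ++ data) ss := by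
  induction data generalizing rem with
  | nil => simp
  | cons d ds ih =>
    simp only [List.foldl_cons, ssInnerA_parts d rem ss h, ih (rem ++ [d])]
    simp

-- ===== VERDICT (by name: the statement is the Claim_ definition above) =====
theorem ss_build_buckets_spec : Claim_equal_ss_build_buckets := by
  intro data splitters _ hpre
  unfold Spec_ss_build_buckets ss_build_buckets ss_build_buckets_alt
  cases hs : splitters with
  | nil =>
    rcases hpre with h | h
    · exact absurd hs h
    · subst h; rfl
  | cons s rest =>
    rw [← ssPartsB_nil_eq, foldl_ssInnerA data (s :: rest) (by simp) []]
    rfl
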